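-- pv_equiv track=rewrite | github.com/AmandaRSwan/MomentTheoremCode | InsertDelete.py | determine
-- ===== SOURCE A (Python) =====
-- def genweight(n, s):                                    #Program for generating the recursive weights for words of length n with a maximum of s errors.
--     empty = []                                          #Establish an empty array
--     for i in range(s-1):
--         empty.append(0)                                 #Add s-1 0 bits to the empty array
--     empty.append(1)                                     #Add a 1-bit to the array
--     for i in range(n+s):                                #Assign the range to be the length n of the code word plus the maximum number of errors
--         t = 0                                           #Initialize variable t as 0
--         sum = 1                                         #Initialize the sum to start at 1
--         while t < (s):                                  #While t is less than the maximum number of errors given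
--             sum = sum + empty[i+t]                      #Recursively add the weights of the s-previous bits
--             t = t + 1                                   #Increase t by a factor of 1 (t will increase as long as it is strictly less than s)
--         empty.append(sum)                               #Add the calculated sum the array
--     for i in range(s-1):
--         empty.remove(0)                                 #Remove the beginning 0-bits from the array
--     return empty                                        #Store the array in memory
--
-- def moment(x, s):                                       #Program to calculate the moment of a codeword, x, with a maximum of s errors
--     w = genweight(len(x), s)                            #Assign w to be the weights generated from the weight program
--     moment = 0                                          #Initialize moment to be 0
--     for i in range(len(x)):                             #For the length of the given word
--         moment += (int(x[i])*w[i])                      #Calculate moment by multiplying the weight of the bit by the value of the bit (either 0 or 1)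
--     return moment                                       #Store the calculated moment
--
-- def determine(z, s):                                    #Program to find the moment of the word with the rightmost 1-bit deleted
--     word = z                                            #Assign word to be the given word z
--     l = len(word)                                       #Assign l to be the length of the word
--     pos = l - 1                                         #Assign variable pos to be equal to one less than the length of the word
--     counter = 1                                         #Keep track of how many 1 bits are found, initialize this counter as 1
--     count = word.count(1)                               #Count the number of 1's in the word
--     my = 0                                              #Initialzie moment to be 0
--     if count < 1:                                       #If the number of 1-bits in the word is less than 1 (equal to 0)
--         my = 0                                          #The moment must be 0
--     else:                                               #If there is at least one 1-bit, proceed to do the following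
--         while counter <= 1 and pos >= 0:                #As the counter is less than or equal to 1, do the following
--             if word[pos] == 1:                          #If the bit at the specified position is a 1-bit
--                 del word[pos]                           #Continue to delete the 1-bit
--                 counter = counter + 1                   #Increase the number of 1's found/deleted by one
--             else:                                       #If the bit is not a 1-bit
--                 pass                                    #Do nothing
--             pos = pos - 1                               #Go to the next position from right to left
--         my = moment(word, s)                            #Calculate the moment of the word with the rightmost 1-bit deleted
--     return my                                           #Store the found moment
-- ===== SOURCE B (Python) =====
-- def determine(z, s):                                    # moment of the word after deleting its rightmost 1-bit
--     word = z                                            # same in-place deletion as the original (mutates z)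
--     for j in range(len(word) - 1, -1, -1):
--         if word[j] == 1:
--             del word[j]
--             break
--     else:
--         return 0                                        # no 1-bit: moment is 0
--     n = len(word)
--     if n == 0:
--         return 0
--     # weights follow w[0] = 1, w[k] = 1 + (sum of the s previous entries of the padded
--     # sequence); keep that window sum running, and accumulate the moment in the same pass
--     win = s if s > 0 else 0
--     ws = 1 if win >= 1 else 0                           # window currently holds the single seed 1
--     vals = [1]
--     m = word[0] * 1
--     for k in range(1, n):
--         wk = 1 + ws
--         vals.append(wk)
--         if win >= 1:
--             ws += wk
--             if k >= win:
--                 ws -= vals[k - win]                     # element sliding out of the window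
--         m += word[k] * wk
--     return m
-- ===== Notes on version B (the rewrite author's own statement) =====
-- stated objective: alternative
-- what changed: B finds the rightmost 1 with one backward scan and computes the recurrence weights with a running window sum fused into the moment accumulation in a single pass, instead of A's rebuilding the whole weight table with an s-term inner re-sum per entry, a separate remove() cleanup and a separate moment pass.
import Mathlib
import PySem

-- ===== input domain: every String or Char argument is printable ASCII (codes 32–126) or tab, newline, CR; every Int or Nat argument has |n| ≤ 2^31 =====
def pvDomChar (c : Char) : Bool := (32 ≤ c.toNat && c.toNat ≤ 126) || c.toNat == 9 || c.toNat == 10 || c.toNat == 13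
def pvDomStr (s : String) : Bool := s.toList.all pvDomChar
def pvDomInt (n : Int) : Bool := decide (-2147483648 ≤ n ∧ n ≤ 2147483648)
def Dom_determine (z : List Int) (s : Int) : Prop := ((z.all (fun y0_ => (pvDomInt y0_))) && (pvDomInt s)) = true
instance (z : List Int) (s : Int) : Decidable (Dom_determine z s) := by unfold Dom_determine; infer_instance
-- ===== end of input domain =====

-- B replaces A's per-entry s-term re-summation of the weight table by a single pass that
-- keeps a running window sum and accumulates the moment as it goes (objective: alternative).
-- Both A and B delete the rightmost 1 from the caller's list in place; the equivalence
-- proved here is about the return value (the mutation is the same in both).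

-- ===== PORT A =====
-- while loop of `determine`: counter/pos bookkeeping, deleting word[pos] when it is 1;
-- fuel = pos + 1 (pos drops by one each iteration, the loop stops when pos < 0)
def delLoopAux (word : List Int) (counter : Int) : Nat → List Int
  | 0 => word
  | f + 1 =>
    if counter ≤ 1 then
      if PySem.List.pyGetD word (f : Int) 0 = 1 then
        delLoopAux ((PySem.List.pop? word (f : Int)).getD (0, word)).2 (counter + 1) f
      else
        delLoopAux word counter f
    else word

def delLoop (word : List Int) (counter : Int) (pos : Int) : List Int :=
  delLoopAux word counter (pos + 1).toNat

def genweight (n : Int) (s : Int) : List Int :=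
  let empty : List Int := (PySem.List.pyRange 0 (s - 1) 1).foldl (fun acc _ => acc ++ [(0 : Int)]) []
  let empty := empty ++ [(1 : Int)]
  let empty := (PySem.List.pyRange 0 (n + s) 1).foldl (fun acc i =>
      acc ++ [(PySem.List.pyRange 0 s 1).foldl
                (fun sum t => sum + PySem.List.pyGetD acc (i + t) 0) 1]) empty
  (PySem.List.pyRange 0 (s - 1) 1).foldl (fun acc _ => (PySem.List.remove? acc 0).getD acc) empty

def moment (x : List Int) (s : Int) : Int :=
  let w := genweight (x.length : Int) s
  (PySem.List.pyRange 0 (x.length : Int) 1).foldl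
    (fun m i => m + PySem.List.pyGetD x i 0 * PySem.List.pyGetD w i 0) 0

def determine (z : List Int) (s : Int) : Int :=
  let word := z
  let l : Int := (word.length : Int)
  let pos := l - 1
  let count := PySem.List.count word 1
  if count < 1 then 0
  else moment (delLoop word 1 pos) s

-- ===== PORT B =====
-- backward scan of Source B's for/else (j from len-1 down to 0): delete the rightmost 1,
-- or none when there is no 1; fuel = j + 1
def bFindAux (word : List Int) : Nat → Option (List Int)
  | 0 => none
  | f + 1 =>
    if PySem.List.pyGetD word (f : Int) 0 = 1 then
      some ((PySem.List.pop? word (f : Int)).getD (0, word)).2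
    else
      bFindAux word f

def bFind (word : List Int) (j : Int) : Option (List Int) :=
  bFindAux word (j + 1).toNat

def determine_alt (z : List Int) (s : Int) : Int :=
  match bFind z ((z.length : Int) - 1) with
  | none => 0
  | some word =>
    if (word.length : Int) = 0 then 0
    else
      let win : Int := if s > 0 then s else 0
      let ws : Int := if 1 ≤ win then 1 else 0
      let vals : List Int := [1]
      let m : Int := PySem.List.pyGetD word 0 0 * 1
      let st := (PySem.List.pyRange 1 (word.length : Int) 1).foldl
        (fun (st : Int × List Int × Int) k =>
          let wk := 1 + st.1
          let vals := st.2.1 ++ [wk]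
          let ws := if 1 ≤ win then
                      (if win ≤ k then st.1 + wk - PySem.List.pyGetD vals (k - win) 0
                       else st.1 + wk)
                    else st.1
          (ws, vals, st.2.2 + PySem.List.pyGetD word k 0 * wk))
        (ws, vals, m)
      st.2.2

-- ===== PRECONDITION & SPEC =====
-- Pre_ excludes exactly the inputs on which A raises IndexError in `moment` (a 1-bit
-- present, negative s, and the shortened word longer than the weight list A builds).
def Pre_determine (z : List Int) (s : Int) : Prop :=
  ¬ (1 ≤ PySem.List.count z 1 ∧ s < 0 ∧
      (((z.length : Int) - 1 + s ≤ 0 ∧ 2 ≤ (z.length : Int) - 1) ∨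
       (0 < (z.length : Int) - 1 + s ∧ s ≤ -2)))
instance (z : List Int) (s : Int) : Decidable (Pre_determine z s) := by
  unfold Pre_determine; infer_instance

def pvWitness_determine : List Int × Int := ([1, 0, 1, 1, 0], 2)

def Spec_determine (z : List Int) (s : Int) (out : Int) : Prop := out = determine_alt z s
instance (z : List Int) (s : Int) (out : Int) : Decidable (Spec_determine z s out) := by
  unfold Spec_determine; infer_instance

-- ===== CLAIM (what is proved, stated in full; the proofs are below) =====
def Claim_equal_determine : Prop :=
  ∀ (z : List Int) (s : Int), Dom_determine z s → Pre_determine z s →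
    Spec_determine z s (determine z s)

-- ===== LEMMAS AND PROOFS =====

-- ---- the deletion scans agree ----

-- A's while loop once the counter has passed 1: it does nothing
theorem delLoopAux_two (w : List Int) (f : Nat) : delLoopAux w 2 f = w := by
  cases f <;> simp [delLoopAux]

-- while a 1 sits at an index below the fuel, both scans delete the same element
theorem scan_agree (z : List Int) (f : Nat) (hf : f ≤ z.length)
    (hex : ∃ k, ∃ hk : k < z.length, k < f ∧ z[k] = 1) :
    ∃ w, bFindAux z f = some w ∧ delLoopAux z 1 f = w ∧ w.length + 1 = z.length := by
  induction f with
  | zero => obtain ⟨k, hk, hkf, _⟩ := hex; omega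
  | succ f ih =>
    have hflen : f < z.length := by omega
    have hget : PySem.List.pyGetD z (f : Int) 0 = z[f] := by
      rw [PySem.List.pyGetD_natCast, List.getD_eq_getElem z 0 hflen]
    have hpop : PySem.List.pop? z (f : Int) = some (z[f], z.eraseIdx f) :=
      PySem.List.pop?_natCast z f hflen
    by_cases h1 : z[f] = 1
    · refine ⟨z.eraseIdx f, ?_, ?_, ?_⟩
      · simp [bFindAux, hget, h1, hpop]
      · simp [delLoopAux, hget, h1, hpop, delLoopAux_two]
      · rw [List.length_eraseIdx_of_lt hflen]; omega
    · obtain ⟨k, hk, hkf, hk1⟩ := hex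
      have hkf' : k < f := by
        rcases Nat.lt_succ_iff_lt_or_eq.mp hkf with h | h
        · exact h
        · exact absurd (h ▸ hk1) h1
      obtain ⟨w, hb, hd, hl⟩ := ih (by omega) ⟨k, hk, hkf', hk1⟩
      exact ⟨w, by simp [bFindAux, hget, h1, hb], by simp [delLoopAux, hget, h1, hd], hl⟩

-- no 1 anywhere: B's scan returns none
theorem scan_none (z : List Int) (f : Nat) (hf : f ≤ z.length)
    (hno : (1:Int) ∉ z) : bFindAux z f = none := by
  induction f with
  | zero => rfl
  | succ f ih =>
    have hflen : f < z.length := by omega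
    have hget : PySem.List.pyGetD z (f : Int) 0 = z[f] := by
      rw [PySem.List.pyGetD_natCast, List.getD_eq_getElem z 0 hflen]
    have h1 : z[f] ≠ 1 := fun h => hno (h ▸ List.getElem_mem hflen)
    simp [bFindAux, hget, h1, ih (by omega)]

-- ---- A's weight-growing loop, abstractly ----

-- state of A's append loop after m iterations
def pvG (s : Int) (init : List Int) : Nat → List Int
  | 0 => init
  | m + 1 =>
    let acc := pvG s init m
    acc ++ [(PySem.List.pyRange 0 s 1).foldl
              (fun sum t => sum + PySem.List.pyGetD acc ((m : Int) + t) 0) 1]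

theorem length_pvG (s : Int) (init : List Int) (m : Nat) :
    (pvG s init m).length = init.length + m := by
  induction m with
  | zero => rfl
  | succ m ih =>
    simp only [pvG, List.length_append, ih, List.length_singleton]
    omega

-- A's append fold over pyRange 0 M 1 is pvG at M.toNat
theorem foldA (s : Int) (init : List Int) (m : Nat) : ∀ (M : Int), M.toNat = m →
    (PySem.List.pyRange 0 M 1).foldl (fun acc i =>
      acc ++ [(PySem.List.pyRange 0 s 1).foldl
                (fun sum t => sum + PySem.List.pyGetD acc (i + t) 0) 1]) init
      = pvG s init m := by
  induction m with
  | zero =>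
    intro M hM
    rw [show PySem.List.pyRange 0 M 1 = [] from PySem.List.pyRange_one_eq_nil (by omega)]
    rfl
  | succ m ih =>
    intro M hM
    have hM' : M = (m : Int) + 1 := by omega
    subst hM'
    rw [PySem.List.pyRange_one_succ_right (by positivity), List.foldl_append,
        ih (m : Int) (by simp)]
    rfl

-- entries of pvG are stable under further growth
theorem getD_pvG_stable (s : Int) (init : List Int) (m m' : Nat) (h : m ≤ m') (j : Nat)
    (hj : j < init.length + m) :
    (pvG s init m').getD j 0 = (pvG s init m).getD j 0 := by
  induction m', h using Nat.le_induction with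
  | base => rfl
  | succ k hk ih =>
    rw [← ih]
    show (pvG s init k ++ _).getD j 0 = _
    rw [List.getD_append _ _ _ _ (by rw [length_pvG]; omega)]

-- ---- the weight sequence, for s ≥ 1 ----

def pvSeed (S : Nat) : List Int := List.replicate (S - 1) 0 ++ [1]

-- the j-th entry of the (padded) weight sequence
def pvFull (S : Nat) (j : Nat) : Int := (pvG (S : Int) (pvSeed S) (j + 1)).getD j 0

-- the running window sum: the S entries before position S + m
def pvWS (S : Nat) (m : Nat) : Int := ((List.range S).map (fun t => pvFull S (m + t))).sum

theorem length_pvSeed (S : Nat) (hS : 1 ≤ S) : (pvSeed S).length = S := by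
  simp [pvSeed]; omega

theorem getD_pvG_full (S : Nat) (hS : 1 ≤ S) (m j : Nat) (hj : j < S + m) :
    (pvG (S : Int) (pvSeed S) m).getD j 0 = pvFull S j := by
  have hlen := length_pvSeed S hS
  rcases le_total m (j + 1) with h | h
  · rw [pvFull, getD_pvG_stable _ _ m (j + 1) h j (by omega)]
  · rw [pvFull, ← getD_pvG_stable _ _ (j + 1) m h j (by omega)]

theorem pvFull_zero (S : Nat) (hS : 1 ≤ S) (j : Nat) (hj : j < S - 1) : pvFull S j = 0 := by
  rw [← getD_pvG_full S hS 0 j (by omega)]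
  show (pvSeed S).getD j 0 = 0
  rw [pvSeed, List.getD_append _ _ _ _ (by simp only [List.length_replicate]; omega),
      List.getD_replicate _ (by omega)]

theorem pvFull_seed (S : Nat) (hS : 1 ≤ S) : pvFull S (S - 1) = 1 := by
  rw [← getD_pvG_full S hS 0 (S - 1) (by omega)]
  show (pvSeed S).getD (S - 1) 0 = 1
  rw [pvSeed]
  rw [show S - 1 = (List.replicate (S - 1) (0:Int)).length from by simp]
  simp [List.getD_eq_getElem?_getD]

theorem pvFull_succ (S : Nat) (hS : 1 ≤ S) (m : Nat) :
    pvFull S (S + m) = 1 + pvWS S m := by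
  have hlenm : (pvG (S : Int) (pvSeed S) m).length = S + m := by
    rw [length_pvG, length_pvSeed S hS]
  have h1 : pvFull S (S + m) = (pvG (S : Int) (pvSeed S) (m + 1)).getD (S + m) 0 := by
    rw [pvFull, getD_pvG_stable _ _ (m + 1) (S + m + 1) (by omega) _ (by rw [length_pvSeed S hS]; omega)]
  rw [h1]
  show ((pvG (S:Int) (pvSeed S) m) ++ [(PySem.List.pyRange 0 (S:Int) 1).foldl
        (fun sum t => sum + PySem.List.pyGetD (pvG (S:Int) (pvSeed S) m) ((m : Int) + t) 0) 1]).getD (S + m) 0 = _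
  rw [show S + m = (pvG (S:Int) (pvSeed S) m).length from hlenm.symm]
  rw [List.getD_append_right _ _ _ _ le_rfl]
  simp only [Nat.sub_self, List.getD_cons_zero]
  rw [PySem.List.pyRange_zero_nat, List.foldl_map, PySem.List.foldl_add]
  congr 1
  apply congrArg List.sum
  apply List.map_congr_left
  intro t ht
  have ht' : t < S := List.mem_range.mp ht
  show PySem.List.pyGetD _ ((m : Int) + (t : Int)) 0 = pvFull S (m + t)
  rw [show (m : Int) + (t : Int) = ((m + t : Nat) : Int) from by push_cast; ring,
      PySem.List.pyGetD_natCast, getD_pvG_full S hS m (m + t) (by omega)]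

theorem pvWS_zero (S : Nat) (_hS : 1 ≤ S) : pvWS S 0 = 1 := by
  obtain ⟨S', rfl⟩ : ∃ S', S = S' + 1 := ⟨S - 1, by omega⟩
  rw [pvWS, List.range_succ]
  simp only [List.map_append, List.sum_append, List.map_cons, List.map_nil, List.sum_cons,
    List.sum_nil, Nat.zero_add]
  have hlast : pvFull (S' + 1) S' = 1 := by
    have := pvFull_seed (S' + 1) (by omega)
    simpa using this
  have hzero : ((List.range S').map (fun t => pvFull (S' + 1) t)).sum = 0 := by
    apply List.sum_eq_zero
    intro x hx
    obtain ⟨t, ht, rfl⟩ := List.mem_map.mp hx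
    exact pvFull_zero (S' + 1) (by omega) t (by simpa using List.mem_range.mp ht)
  simp [hlast, hzero]

theorem pvWS_succ (S : Nat) (_hS : 1 ≤ S) (m : Nat) :
    pvWS S (m + 1) = pvWS S m + pvFull S (S + m) - pvFull S m := by
  have hL : pvWS S m + pvFull S (m + S) = pvFull S m + pvWS S (m + 1) := by
    have e1 : ((List.range (S + 1)).map (fun t => pvFull S (m + t))).sum
        = pvWS S m + pvFull S (m + S) := by
      rw [List.range_succ]; simp [pvWS]
    have e2 : ((List.range (S + 1)).map (fun t => pvFull S (m + t))).sum
        = pvFull S m + pvWS S (m + 1) := by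
      rw [List.range_succ_eq_map, pvWS]
      simp only [List.map_cons, List.sum_cons, List.map_map, Nat.add_zero, Function.comp_def]
      congr 1
      apply congrArg List.sum
      apply List.map_congr_left
      intro t _
      congr 1
      omega
    rw [← e1, e2]
  have : pvFull S (m + S) = pvFull S (S + m) := by congr 1; omega
  omega

-- appending a singleton, repeated: the generic shape of A's zero-padding loop
theorem foldl_const_append (c : Int) (l : List Int) : ∀ (acc : List Int),
    l.foldl (fun a _ => a ++ [c]) acc = acc ++ List.replicate l.length c := by
  induction l with
  | nil => simp
  | cons x l ih =>
    intro acc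
    simp only [List.foldl_cons, ih, List.length_cons]
    rw [List.append_assoc, List.replicate_succ, List.singleton_append]

-- A's remove(0) loop strips exactly the leading zeros
theorem removeFold (idxs : List Int) : ∀ (r : Nat) (rest : List Int), idxs.length = r →
    idxs.foldl (fun acc _ => (PySem.List.remove? acc 0).getD acc) (List.replicate r 0 ++ rest)
      = rest := by
  induction idxs with
  | nil => intro r rest h; simp at h; subst h; simp
  | cons x idxs ih =>
    intro r rest h
    obtain ⟨r', rfl⟩ : ∃ r', r = r' + 1 := ⟨idxs.length, by simpa using h.symm⟩
    simp only [List.foldl_cons, List.replicate_succ, List.cons_append,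
      PySem.List.remove?_cons_self, Option.getD_some]
    exact ih r' rest (by simpa using h)

-- pvG is the zero padding followed by the generated values
theorem pvG_shape (s : Int) (S : Nat) (m : Nat) :
    ∃ rest, pvG s (pvSeed S) m = List.replicate (S - 1) 0 ++ rest := by
  induction m with
  | zero => exact ⟨[1], rfl⟩
  | succ m ih =>
    obtain ⟨rest, hr⟩ := ih
    refine ⟨rest ++ [(PySem.List.pyRange 0 s 1).foldl
        (fun sum t => sum + PySem.List.pyGetD (List.replicate (S - 1) 0 ++ rest) ((m : Int) + t) 0) 1], ?_⟩
    simp only [pvG]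
    rw [hr, List.append_assoc]

-- pvG with a nonpositive window: every generated value is 1
theorem pvG_nonpos (s : Int) (hs : s ≤ 0) (init : List Int) (m : Nat) :
    pvG s init m = init ++ List.replicate m 1 := by
  induction m with
  | zero => simp [pvG]
  | succ m ih =>
    simp only [pvG, ih, PySem.List.pyRange_one_eq_nil hs, List.foldl_nil,
      List.append_assoc, List.replicate_succ']

-- ---- A's moment, as a sum over the word ----

theorem moment_fold (x w : List Int) :
    (PySem.List.pyRange 0 (x.length : Int) 1).foldl
      (fun m i => m + PySem.List.pyGetD x i 0 * PySem.List.pyGetD w i 0) 0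
    = ((List.range x.length).map (fun i => x.getD i 0 * w.getD i 0)).sum := by
  rw [PySem.List.pyRange_zero_nat, List.foldl_map, PySem.List.foldl_add]
  simp only [PySem.List.pyGetD_natCast, zero_add]

theorem moment_eq_sum (x : List Int) (s : Int) (hs : 1 ≤ s) :
    moment x s
      = ((List.range x.length).map
          (fun i => x.getD i 0 * pvFull s.toNat (s.toNat - 1 + i))).sum := by
  have hS : 1 ≤ s.toNat := by omega
  set S := s.toNat with hSdef
  have hsS : s = (S : Int) := by omega
  simp only [moment, genweight]
  rw [moment_fold]
  congr 1
  apply List.map_congr_left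
  intro i hi
  have hi' : i < x.length := List.mem_range.mp hi
  have key : ∀ w : List Int, w.getD i 0 = pvFull S (S - 1 + i) →
      x.getD i 0 * w.getD i 0 = x.getD i 0 * pvFull S (S - 1 + i) := fun w h => by rw [h]
  apply key
  -- identify the weight list
  rw [foldl_const_append, List.nil_append, PySem.List.length_pyRange_one]
  have hrep : (s - 1 - 0).toNat = S - 1 := by omega
  rw [hrep]
  have hseed : List.replicate (S - 1) (0:Int) ++ [1] = pvSeed S := rfl
  rw [hseed, foldA s (pvSeed S) (x.length + S) ((x.length : Int) + s) (by omega)]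
  obtain ⟨rest, hrest⟩ := pvG_shape s S (x.length + S)
  rw [hrest, removeFold _ (S - 1) rest (by rw [PySem.List.length_pyRange_one]; omega)]
  have : rest.getD i 0 = (List.replicate (S - 1) (0:Int) ++ rest).getD (S - 1 + i) 0 := by
    rw [List.getD_append_right _ _ _ _ (by simp)]
    congr 1
    simp
  rw [this, ← hrest, hsS, getD_pvG_full S hS (x.length + S) (S - 1 + i) (by omega)]


theorem moment_eq_sum_nonpos (x : List Int) (s : Int) (hs : s ≤ 0)
    (hok : ∀ i : Nat, i < x.length → i < ((x.length : Int) + s).toNat + 1) :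
    moment x s = ((List.range x.length).map (fun i => x.getD i 0)).sum := by
  simp only [moment, genweight]
  rw [moment_fold]
  congr 1
  apply List.map_congr_left
  intro i hi
  have hi' : i < x.length := List.mem_range.mp hi
  have key : ∀ w : List Int, w.getD i 0 = 1 →
      x.getD i 0 * w.getD i 0 = x.getD i 0 := fun w h => by rw [h, mul_one]
  apply key
  rw [show PySem.List.pyRange 0 (s - 1) 1 = [] from PySem.List.pyRange_one_eq_nil (by omega)]
  simp only [List.foldl_nil, List.nil_append]
  rw [foldA s [1] ((x.length : Int) + s).toNat ((x.length : Int) + s) rfl,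
      pvG_nonpos s hs [1]]
  have hidx : i < ((x.length : Int) + s).toNat + 1 := hok i hi'
  have h1 : ([(1:Int)] ++ List.replicate ((x.length : Int) + s).toNat 1).getD i 0 = 1 := by
    rw [show [(1:Int)] ++ List.replicate ((x.length : Int) + s).toNat 1
          = List.replicate (((x.length : Int) + s).toNat + 1) 1 from by
        rw [List.replicate_succ, List.singleton_append]]
    exact List.getD_replicate _ hidx
  exact h1

-- ---- B's fused loop ----

-- invariant of B's single pass for s ≥ 1: running window sum, weights so far, partial moment
theorem bLoop_pos (word : List Int) (S : Nat) (hS : 1 ≤ S) (k : Nat) (hk : k < word.length) :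
    (PySem.List.pyRange 1 (1 + (k : Int)) 1).foldl
      (fun (st : Int × List Int × Int) j =>
        let wk := 1 + st.1
        let vals := st.2.1 ++ [wk]
        let ws := if 1 ≤ (S : Int) then
                    (if (S : Int) ≤ j then st.1 + wk - PySem.List.pyGetD vals (j - (S : Int)) 0
                     else st.1 + wk)
                  else st.1
        (ws, vals, st.2.2 + PySem.List.pyGetD word j 0 * wk))
      (1, [1], PySem.List.pyGetD word 0 0 * 1)
    = (pvWS S k, (List.range (k + 1)).map (fun i => pvFull S (S - 1 + i)),
       ((List.range (k + 1)).map (fun i => word.getD i 0 * pvFull S (S - 1 + i))).sum) := by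
  induction k with
  | zero =>
    rw [PySem.List.pyRange_one_eq_nil (by omega), List.foldl_nil]
    have hseed : pvFull S (S - 1) = 1 := pvFull_seed S hS
    have hget : PySem.List.pyGetD word 0 0 = word.getD 0 0 := by
      rw [show (0:Int) = ((0:Nat):Int) from rfl, PySem.List.pyGetD_natCast]
    rw [Prod.mk.injEq, Prod.mk.injEq]
    exact ⟨(pvWS_zero S hS).symm, by simp [hseed], by simp [List.range_succ, hseed, hget]⟩
  | succ k ih =>
    have hk' : k < word.length := by omega
    have hsplit : 1 + ((k + 1 : Nat) : Int) = (1 + (k : Int)) + 1 := by push_cast; ring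
    rw [hsplit, PySem.List.pyRange_one_succ_right (by omega), List.foldl_append, ih hk',
        List.foldl_cons, List.foldl_nil]
    have hwk : 1 + pvWS S k = pvFull S (S - 1 + (k + 1)) := by
      rw [show S - 1 + (k + 1) = S + k from by omega, pvFull_succ S hS]
    have hvals : (List.range (k + 1)).map (fun i => pvFull S (S - 1 + i)) ++ [1 + pvWS S k]
        = (List.range (k + 1 + 1)).map (fun i => pvFull S (S - 1 + i)) := by
      rw [List.range_succ (n := k + 1), List.map_append]
      simp [hwk]
    have hfullk : pvFull S (S + k) = 1 + pvWS S k := pvFull_succ S hS k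
    have hws : (if 1 ≤ (S : Int) then
          (if (S : Int) ≤ 1 + (k : Int) then
              pvWS S k + (1 + pvWS S k) -
                PySem.List.pyGetD
                  ((List.range (k + 1)).map (fun i => pvFull S (S - 1 + i)) ++ [1 + pvWS S k])
                  (1 + (k : Int) - (S : Int)) 0
           else pvWS S k + (1 + pvWS S k))
        else pvWS S k) = pvWS S (k + 1) := by
      rw [if_pos (by exact_mod_cast hS)]
      by_cases hSk : S ≤ k + 1
      · rw [if_pos (by omega)]
        have hcast : 1 + (k : Int) - (S : Int) = ((k + 1 - S : Nat) : Int) := by omega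
        rw [hcast, PySem.List.pyGetD_natCast, hvals,
            List.getD_eq_getElem _ 0 (by simp only [List.length_map, List.length_range]; omega),
            List.getElem_map, List.getElem_range]
        have : pvFull S (S - 1 + (k + 1 - S)) = pvFull S k := by congr 1; omega
        rw [this, pvWS_succ S hS k, hfullk]
      · rw [if_neg (by omega)]
        rw [pvWS_succ S hS k, hfullk, pvFull_zero S hS k (by omega)]
        ring
    have hmom : PySem.List.pyGetD word (1 + (k : Int)) 0 * (1 + pvWS S k)
        = word.getD (k + 1) 0 * pvFull S (S - 1 + (k + 1)) := by
      rw [show 1 + (k : Int) = ((k + 1 : Nat) : Int) from by push_cast; ring,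
          PySem.List.pyGetD_natCast, hwk]
    simp only []
    rw [Prod.mk.injEq, Prod.mk.injEq]
    refine ⟨hws, hvals, ?_⟩
    rw [hmom, List.range_succ (n := k + 1), List.map_append, List.sum_append]
    simp

-- B's single pass for s ≤ 0: the window stays empty, every weight is 1
theorem bLoop_nonpos (word : List Int) (win : Int) (hw : ¬ 1 ≤ win) (k : Nat) (hk : k < word.length) :
    ∃ vals, (PySem.List.pyRange 1 (1 + (k : Int)) 1).foldl
      (fun (st : Int × List Int × Int) j =>
        let wk := 1 + st.1
        let vals := st.2.1 ++ [wk]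
        let ws := if 1 ≤ win then
                    (if win ≤ j then st.1 + wk - PySem.List.pyGetD vals (j - win) 0
                     else st.1 + wk)
                  else st.1
        (ws, vals, st.2.2 + PySem.List.pyGetD word j 0 * wk))
      (0, [1], PySem.List.pyGetD word 0 0 * 1)
    = (0, vals, ((List.range (k + 1)).map (fun i => word.getD i 0)).sum) := by
  induction k with
  | zero =>
    refine ⟨[1], ?_⟩
    rw [PySem.List.pyRange_one_eq_nil (by omega), List.foldl_nil]
    have hget : PySem.List.pyGetD word 0 0 = word.getD 0 0 := by
      rw [show (0:Int) = ((0:Nat):Int) from rfl, PySem.List.pyGetD_natCast]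
    simp [List.range_succ, hget]
  | succ k ih =>
    obtain ⟨vals, hv⟩ := ih (by omega)
    have hsplit : 1 + ((k + 1 : Nat) : Int) = (1 + (k : Int)) + 1 := by push_cast; ring
    refine ⟨vals ++ [1 + 0], ?_⟩
    rw [hsplit, PySem.List.pyRange_one_succ_right (by omega), List.foldl_append, hv,
        List.foldl_cons, List.foldl_nil]
    simp only [if_neg hw]
    rw [Prod.mk.injEq, Prod.mk.injEq]
    refine ⟨rfl, rfl, ?_⟩
    rw [show 1 + (k : Int) = ((k + 1 : Nat) : Int) from by push_cast; ring,
        PySem.List.pyGetD_natCast, List.range_succ (n := k + 1), List.map_append, List.sum_append]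
    simp

-- ===== VERDICT (by name: the statement is the Claim_ definition above) =====
theorem determine_spec : Claim_equal_determine := by
  intro z s _ hpre
  unfold Spec_determine
  simp only [determine, determine_alt, bFind, delLoop]
  have hfuel : (((z.length : Int) - 1) + 1).toNat = z.length := by omega
  rw [hfuel]
  by_cases hc : PySem.List.count z 1 < 1
  · -- no 1-bit: A returns 0, B's scan finds nothing
    have hno : (1:Int) ∉ z := by
      rw [PySem.List.count_eq] at hc
      exact fun h => absurd (List.count_pos_iff.mpr h) (by omega)
    rw [if_pos hc, scan_none z z.length le_rfl hno]
  · -- a 1-bit is present: both delete the rightmost one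
    have hmem : (1:Int) ∈ z := by
      rw [PySem.List.count_eq] at hc
      exact List.count_pos_iff.mp (by omega)
    obtain ⟨k, hk, hk1⟩ := List.mem_iff_getElem.mp hmem
    obtain ⟨w, hbf, hdl, hwlen⟩ := scan_agree z z.length le_rfl ⟨k, hk, hk, hk1⟩
    rw [hdl, if_neg hc]
    simp only [hbf]
    by_cases hw0 : w.length = 0
    · -- the word was the single 1: both moments are 0
      rw [List.length_eq_zero_iff.mp hw0]
      simp only [moment]
      rw [moment_fold]
      simp
    · rw [if_neg (by exact_mod_cast hw0)]
      have hn : 1 ≤ w.length := by omega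
      have hsplitlen : (w.length : Int) = 1 + ((w.length - 1 : Nat) : Int) := by omega
      by_cases hs : 1 ≤ s
      · -- positive window: both sides are the window-sum weights
        have hS : 1 ≤ s.toNat := by omega
        have hwin : (if s > 0 then s else 0) = ((s.toNat : Nat) : Int) := by
          rw [if_pos (by omega)]; omega
        rw [moment_eq_sum w s hs, hwin,
            show (if (1:Int) ≤ ((s.toNat : Nat) : Int) then (1:Int) else 0) = 1 from
              if_pos (by exact_mod_cast hS),
            hsplitlen, bLoop_pos w s.toNat hS (w.length - 1) (by omega),
            show w.length - 1 + 1 = w.length from by omega]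
      · -- nonpositive window: every weight is 1 on both sides
        have hs0 : s ≤ 0 := by omega
        have hok : ∀ i : Nat, i < w.length → i < ((w.length : Int) + s).toNat + 1 := by
          intro i hi
          have hcount : 1 ≤ PySem.List.count z 1 := by omega
          have h2 : ¬ (((z.length : Int) - 1 + s ≤ 0 ∧ 2 ≤ (z.length : Int) - 1) ∨
              (0 < (z.length : Int) - 1 + s ∧ s ≤ -2)) := by
            by_cases hse : s = 0
            · subst hse; omega
            · exact fun h => hpre ⟨hcount, by omega, h⟩
          omega
        have hwin : (if s > 0 then s else 0) = (0 : Int) := by rw [if_neg (by omega)]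
        rw [moment_eq_sum_nonpos w s hs0 hok, hwin,
            show (if (1:Int) ≤ (0:Int) then (1:Int) else 0) = 0 from if_neg (by omega)]
        obtain ⟨vals, hfold⟩ := bLoop_nonpos w 0 (by omega) (w.length - 1) (by omega)
        rw [hsplitlen, hfold, show w.length - 1 + 1 = w.length from by omega]
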